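-- pv_equiv track=rewrite | github.com/aunghoo/coding_practice | Coding Challenges/Citadel_2021NewGrad/question1packets.py | droppedRequests
-- ===== SOURCE A (Python) =====
-- def droppedRequests(requestTime):
--     # Write your code here
--
--     totalDropped = 0
--     # requests since time t
--     requestsSince = {}
--     currentSecond = requestTime[0]
--     currentSecondRequests = 0
--     for index, t in enumerate(requestTime):
--         satisfied = True
--         if t not in requestsSince:
--             requestsSince[t] = 0
--         if currentSecond == t and currentSecondRequests >= 3:
--             satisfied = False
--         if satisfied:
--             # find the first second in last 10 sec window
--             for i in range(t-9, t):
--                 if i in requestsSince and requestsSince[i] >= 20: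
--                     satisfied = False
--                     break
--         if satisfied:
--             # find the first second in last 1 min window
--             for i in range(t-59, t):
--                 if i in requestsSince and requestsSince[i] >= 60:
--                     satisfied = False
--                     break
--         # update requests made since for each starting times
--         if t not in requestsSince:
--             requestsSince[t] = 0
--         for k in requestsSince:
--             requestsSince[k] += 1
--         # update how many requests so far for current second
--         if currentSecond != t:
--             currentSecond = t
--             currentSecondRequests = 0
--         currentSecondRequests += 1
--
--         if not satisfied:
--             totalDropped += 1
--
--     return totalDropped
-- ===== SOURCE B (Python) =====
-- def droppedRequests(requestTime):
--     # One pass over precomputed first-occurrence indices: the count of requests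
--     # "since second s" at step idx is simply idx - firstOcc[s], so no per-key
--     # increments are needed.
--     firstOcc = {}
--     for idx, t in enumerate(requestTime):
--         if t not in firstOcc:
--             firstOcc[t] = idx
--     dropped = 0
--     prev = None
--     run = 0
--     for idx, t in enumerate(requestTime):
--         bad = (prev == t and run >= 3)
--         if not bad:
--             bad = any(i in firstOcc and firstOcc[i] <= idx - 20
--                       for i in range(t - 9, t))
--         if not bad:
--             bad = any(i in firstOcc and firstOcc[i] <= idx - 60
--                       for i in range(t - 59, t))
--         if bad:
--             dropped += 1
--         if prev != t:
--             prev = t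
--             run = 0
--         run += 1
--     return dropped
-- ===== Notes on version B (the rewrite author's own statement) =====
-- stated objective: faster
-- what changed: Instead of incrementing a per-second counter for every dict key on each request (O(n*k)), B precomputes each second's first-occurrence index once and gets every 'requests since second s' count as the difference idx - firstOcc[s].
import Mathlib
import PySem

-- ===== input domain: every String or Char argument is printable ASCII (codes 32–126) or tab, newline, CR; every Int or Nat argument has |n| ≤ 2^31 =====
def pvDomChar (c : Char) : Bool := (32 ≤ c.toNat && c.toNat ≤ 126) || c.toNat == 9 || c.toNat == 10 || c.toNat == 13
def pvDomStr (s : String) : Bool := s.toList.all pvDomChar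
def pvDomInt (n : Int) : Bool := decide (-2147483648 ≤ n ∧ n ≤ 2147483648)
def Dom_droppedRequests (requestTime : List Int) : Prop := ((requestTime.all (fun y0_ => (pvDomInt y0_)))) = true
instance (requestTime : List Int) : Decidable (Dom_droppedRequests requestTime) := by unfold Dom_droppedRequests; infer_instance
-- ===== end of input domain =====

-- B replaces A's per-step increment of every dict key by a precomputed first-occurrence
-- index per second (count since second s at step idx = idx - firstOcc[s]); measured faster.
-- A raises IndexError on the empty list (requestTime[0]); Pre_ excludes it.

-- ===== PORT A =====
-- one loop iteration of A (state: totalDropped, requestsSince, currentSecond, currentSecondRequests)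
def stepA (st : Int × PySem.Dict Int Int × Int × Int) (p : Int × Int) :
    Int × PySem.Dict Int Int × Int × Int :=
  let (totalDropped, rs, cs, cc) := st
  let t := p.2
  let rs := if rs.contains t then rs else rs.insert t 0
  let satisfied := true
  let satisfied := if cs == t && decide (cc ≥ 3) then false else satisfied
  let satisfied := if satisfied then
      !((PySem.List.pyRange (t-9) t 1).any (fun i => rs.contains i && decide (rs.getD i 0 ≥ 20)))
    else satisfied
  let satisfied := if satisfied then
      !((PySem.List.pyRange (t-59) t 1).any (fun i => rs.contains i && decide (rs.getD i 0 ≥ 60)))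
    else satisfied
  let rs := if rs.contains t then rs else rs.insert t 0
  let rs := rs.keys.foldl (fun d k => d.modify k 0 (· + 1)) rs
  let cscc := if cs != t then (t, (0 : Int)) else (cs, cc)
  let cc := cscc.2 + 1
  let totalDropped := if !satisfied then totalDropped + 1 else totalDropped
  (totalDropped, rs, cscc.1, cc)

def droppedRequests (requestTime : List Int) : Int :=
  -- requestTime[0]: Python raises IndexError on []; Pre_ excludes it, the default is never used there
  let cs := PySem.List.pyGetD requestTime 0 0
  ((PySem.List.enumerate requestTime 0).foldl stepA (0, PySem.Dict.empty, cs, 0)).1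

-- ===== PORT B =====
-- first pass of B: firstOcc[t] = index of the first occurrence of t
def foStep (d : PySem.Dict Int Int) (p : Int × Int) : PySem.Dict Int Int :=
  if d.contains p.2 then d else d.insert p.2 p.1

def firstOccOf (xs : List Int) : PySem.Dict Int Int :=
  (PySem.List.enumerate xs 0).foldl foStep PySem.Dict.empty

-- Python's 'prev == t' / 'prev != t' where prev may be None
def prevEq (prev : Option Int) (t : Int) : Bool := match prev with | some pv => pv == t | none => false
def prevNe (prev : Option Int) (t : Int) : Bool := match prev with | some pv => pv != t | none => true

-- one loop iteration of B's second pass (state: dropped, prev, run)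
def stepB (fo : PySem.Dict Int Int) (st : Int × Option Int × Int) (p : Int × Int) :
    Int × Option Int × Int :=
  let (dropped, prev, run) := st
  let (idx, t) := p
  let bad := prevEq prev t && decide (run ≥ 3)
  let bad := if !bad then
      (PySem.List.pyRange (t-9) t 1).any (fun i => fo.contains i && decide (fo.getD i 0 ≤ idx - 20))
    else bad
  let bad := if !bad then
      (PySem.List.pyRange (t-59) t 1).any (fun i => fo.contains i && decide (fo.getD i 0 ≤ idx - 60))
    else bad
  let dropped := if bad then dropped + 1 else dropped
  let prevrun := if prevNe prev t then (some t, (0 : Int)) else (prev, run)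
  (dropped, prevrun.1, prevrun.2 + 1)

def droppedRequests_alt (requestTime : List Int) : Int :=
  let fo := firstOccOf requestTime
  ((PySem.List.enumerate requestTime 0).foldl (stepB fo) (0, none, 0)).1

-- ===== PRECONDITION & SPEC =====
-- Pre_ excludes only the empty list, on which the Python A raises IndexError (requestTime[0]).
def Pre_droppedRequests (requestTime : List Int) : Prop := requestTime ≠ []
instance (requestTime : List Int) : Decidable (Pre_droppedRequests requestTime) := by
  unfold Pre_droppedRequests; infer_instance

def pvWitness_droppedRequests : List Int := [0, 0, 0, 0, 1]

def Spec_droppedRequests (requestTime : List Int) (out : Int) : Prop :=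
  out = droppedRequests_alt requestTime
instance (requestTime : List Int) (out : Int) : Decidable (Spec_droppedRequests requestTime out) := by
  unfold Spec_droppedRequests; infer_instance

-- ===== CLAIM (what is proved, stated in full; the proofs are below) =====
def Claim_equal_droppedRequests : Prop := ∀ (requestTime : List Int),
  Dom_droppedRequests requestTime → Pre_droppedRequests requestTime →
  Spec_droppedRequests requestTime (droppedRequests requestTime)

-- ===== LEMMAS AND PROOFS =====

-- the dict built by B's first pass looks up the first-occurrence index
lemma get?_foldl_foStep (suf : List Int) : ∀ (n : Int) (d : PySem.Dict Int Int) (k : Int),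
    ((PySem.List.enumerate suf n).foldl foStep d).get? k =
      ((d.get? k).or ((PySem.List.index? suf k).map (fun j => n + (j : Int)))) := by
  induction suf with
  | nil => intro n d k; simp [PySem.List.enumerate_nil, PySem.List.index?_eq_idxOf?, List.idxOf?_nil]
  | cons x suf ih =>
    intro n d k
    rw [PySem.List.enumerate_cons]
    simp only [List.foldl_cons, ih]
    by_cases hk : k = x
    · subst hk
      rw [PySem.List.index?_cons_self]
      by_cases hc : d.contains k
      · obtain ⟨v, hv⟩ : ∃ v, d.get? k = some v := by
          rw [PySem.Dict.contains_eq_isSome_get?] at hc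
          exact Option.isSome_iff_exists.mp hc
        simp [foStep, hc, hv, Option.or]
      · have hn : d.get? k = none := by
          rw [PySem.Dict.contains_eq_isSome_get?] at hc
          exact Option.not_isSome_iff_eq_none.mp (by simpa using hc)
        simp [foStep, hc, hn, PySem.Dict.get?_insert_self, Option.or]
    · rw [PySem.List.index?_cons_of_ne suf (fun h : x = k => hk h.symm)]
      have hg : (foStep d (n, x)).get? k = d.get? k := by
        unfold foStep
        split
        · rfl
        · exact PySem.Dict.get?_insert_of_ne _ _ hk
      rw [hg]
      congr 1
      cases PySem.List.index? suf k with
      | none => rfl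
      | some j => simp; omega

-- any over the same list with predicates agreeing on its members
lemma any_congr_mem {α : Type} {l : List α} {p q : α → Bool} (h : ∀ x ∈ l, p x = q x) :
    l.any p = l.any q := by
  induction l with
  | nil => rfl
  | cons a l ih =>
    simp only [List.any_cons, h a (List.mem_cons_self ..),
      ih (fun x hx => h x (List.mem_cons_of_mem _ hx))]

lemma fo_get? (xs : List Int) (k : Int) :
    (firstOccOf xs).get? k = (PySem.List.index? xs k).map (fun j => (j : Int)) := by
  unfold firstOccOf
  rw [get?_foldl_foStep]
  rw [PySem.Dict.get?_empty, Option.none_or]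
  cases PySem.List.index? xs k <;> simp

lemma fo_contains (xs : List Int) (k : Int) :
    (firstOccOf xs).contains k = decide (k ∈ xs) := by
  rw [PySem.Dict.contains_eq_isSome_get?, fo_get?]
  by_cases hk : k ∈ xs
  · obtain ⟨j, hj⟩ := Option.isSome_iff_exists.mp ((PySem.List.index?_isSome_iff xs k).mpr hk)
    rw [hj]
    simp [hk]
  · rw [(PySem.List.index?_eq_none_iff xs k).mpr hk]
    simp [hk]

-- the first occurrence of a value absent from the prefix lies at or beyond the prefix
lemma first_ge_of_not_mem_prefix (pre suf : List Int) (k : Int) (j : Nat) (hk : k ∉ pre)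
    (hj : PySem.List.index? (pre ++ suf) k = some j) : pre.length ≤ j := by
  by_contra hlt
  push Not at hlt
  obtain ⟨hjlen, hget, _⟩ := PySem.List.getElem_of_index?_eq_some hj
  apply hk
  have hpre : (pre ++ suf)[j]'hjlen = pre[j]'hlt := List.getElem_append_left hlt
  rw [hpre] at hget
  exact hget ▸ List.getElem_mem hlt

-- the two window tests agree: A reads the maintained counters, B subtracts first-occurrence indices
lemma window_eq (xs pre suf : List Int) (t : Int) (h : xs = pre ++ t :: suf)
    (rs' : PySem.Dict Int Int)
    (hcont : ∀ i, rs'.contains i = decide (i = t ∨ i ∈ pre))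
    (hval : ∀ i, i ∈ pre → i ≠ t →
      rs'.getD i 0 = (pre.length : Int) - (((PySem.List.index? pre i).getD 0 : Nat) : Int))
    (a c : Int) (hc : 0 < c) :
    (PySem.List.pyRange a t 1).any (fun i => rs'.contains i && decide (rs'.getD i 0 ≥ c)) =
    (PySem.List.pyRange a t 1).any (fun i => (firstOccOf xs).contains i &&
      decide ((firstOccOf xs).getD i 0 ≤ (pre.length : Int) - c)) := by
  apply any_congr_mem
  intro i hi
  have hit : i ≠ t := by
    have := PySem.List.mem_pyRange_one.mp hi
    omega
  by_cases hp : i ∈ pre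
  · obtain ⟨fp, hfp⟩ := Option.isSome_iff_exists.mp ((PySem.List.index?_isSome_iff pre i).mpr hp)
    have hxs : PySem.List.index? xs i = some fp := by
      rw [h, PySem.List.index?_append_of_mem (t :: suf) hp, hfp]
    have hcm : (firstOccOf xs).contains i = true := by
      rw [fo_contains]
      simp [h, hp]
    have hgd : (firstOccOf xs).getD i 0 = (fp : Int) := by
      rw [PySem.Dict.getD_eq_get?_getD, fo_get?, hxs]
      rfl
    have hbound : (fp : Int) ≤ (pre.length : Int) := by
      obtain ⟨hlt, _, _⟩ := PySem.List.getElem_of_index?_eq_some hfp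
      exact_mod_cast Int.ofNat_le.mpr (le_of_lt hlt)
    rw [hcont i, hval i hp hit, hcm, hgd, hfp]
    have : (i = t ∨ i ∈ pre) := Or.inr hp
    simp only [this, Bool.true_and, decide_true]
    rw [show (Option.getD (some fp) 0 : Nat) = fp from rfl]
    exact decide_eq_decide.mpr (by omega)
  · have hcf : rs'.contains i = false := by
      rw [hcont i]
      simp [hit, hp]
    rw [hcf]
    simp only [Bool.false_and]
    by_cases hx : i ∈ xs
    · obtain ⟨j, hj⟩ := Option.isSome_iff_exists.mp ((PySem.List.index?_isSome_iff xs i).mpr hx)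
      have hge : pre.length ≤ j := first_ge_of_not_mem_prefix pre (t :: suf) i j hp (h ▸ hj)
      have hgd : (firstOccOf xs).getD i 0 = (j : Int) := by
        rw [PySem.Dict.getD_eq_get?_getD, fo_get?, hj]
        rfl
      rw [hgd]
      have : ¬ ((j : Int) ≤ (pre.length : Int) - c) := by
        have : (pre.length : Int) ≤ (j : Int) := by exact_mod_cast hge
        omega
      simp [this]
    · rw [fo_contains]
      simp [hx]

-- incrementing every key of a dict leaves its key list unchanged
lemma keys_incr_all (rs' : PySem.Dict Int Int) :
    (rs'.keys.foldl (fun d k => d.modify k 0 (· + 1)) rs').keys = rs'.keys := by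
  rw [PySem.Dict.keys_foldl_modify rs'.keys 0 (fun _ _ v => v + 1) rs']
  rw [PySem.Set.update_eq_append_filter]
  have hnil : (PySem.Set.ofList rs'.keys).filter (fun y => !PySem.Set.contains rs'.keys y) = [] := by
    rw [List.filter_eq_nil_iff]
    intro a ha
    have ham : a ∈ rs'.keys := (PySem.Set.mem_ofList _ _).mp ha
    simp [ham]
  rw [hnil, List.append_nil]

lemma main_invariant (xs : List Int) : ∀ (suf pre : List Int), xs = pre ++ suf →
    ∀ (dd : Int) (rs : PySem.Dict Int Int) (cs cc : Int) (prev : Option Int) (run : Int),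
    rs.keys.Nodup →
    (∀ i, rs.contains i = decide (i ∈ pre)) →
    (∀ i, i ∈ pre → rs.getD i 0 = (pre.length : Int) - (((PySem.List.index? pre i).getD 0 : Nat) : Int)) →
    ((pre = [] ∧ prev = none ∧ cc = 0 ∧ run = 0) ∨ (pre ≠ [] ∧ prev = some cs ∧ run = cc)) →
    ((PySem.List.enumerate suf (pre.length : Int)).foldl stepA (dd, rs, cs, cc)).1 =
    ((PySem.List.enumerate suf (pre.length : Int)).foldl (stepB (firstOccOf xs)) (dd, prev, run)).1 := by
  intro suf
  induction suf with
  | nil =>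
    intro pre h dd rs cs cc prev run _ _ _ _
    simp [PySem.List.enumerate_nil]
  | cons t suf ih =>
    intro pre h dd rs cs cc prev run hnd hcont hval hpr
    rw [PySem.List.enumerate_cons, List.foldl_cons, List.foldl_cons]
    set n := (pre.length : Int) with hn
    set fo := firstOccOf xs with hfo
    set rs' := if rs.contains t then rs else rs.insert t 0 with hrs'
    have hct' : rs'.contains t = true := by
      by_cases hct : rs.contains t
      · rw [hrs', if_pos hct]; exact hct
      · rw [hrs', if_neg hct]; exact PySem.Dict.contains_insert_self rs t 0
    have hcont' : ∀ i, rs'.contains i = decide (i = t ∨ i ∈ pre) := by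
      intro i
      by_cases hct : rs.contains t
      · rw [hrs', if_pos hct, hcont i]
        have htp : t ∈ pre := by
          have h2 := hcont t
          rw [hct] at h2
          exact of_decide_eq_true h2.symm
        by_cases hit : i = t
        · subst hit; simp [htp]
        · simp [hit]
      · rw [hrs', if_neg hct, PySem.Dict.contains_insert, hcont i]
        by_cases hit : i = t <;> simp [hit]
    have hval' : ∀ i, i ∈ pre → i ≠ t →
        rs'.getD i 0 = n - (((PySem.List.index? pre i).getD 0 : Nat) : Int) := by
      intro i hp hit
      by_cases hct : rs.contains t
      · rw [hrs', if_pos hct]; exact hval i hp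
      · rw [hrs', if_neg hct, PySem.Dict.getD_insert, if_neg hit]; exact hval i hp
    have hnd' : rs'.keys.Nodup := by
      by_cases hct : rs.contains t
      · rw [hrs', if_pos hct]; exact hnd
      · rw [hrs', if_neg hct]; exact PySem.Dict.nodup_keys_insert rs t 0 hnd
    have hw1 := window_eq xs pre suf t h rs' hcont' hval' (t - 9) 20 (by norm_num)
    have hw2 := window_eq xs pre suf t h rs' hcont' hval' (t - 59) 60 (by norm_num)
    have hb1 : (cs == t && decide (cc ≥ 3)) =
        (prevEq prev t && decide (run ≥ 3)) := by
      rcases hpr with ⟨_, hprev, hcc, hrun⟩ | ⟨_, hprev, hrun⟩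
      · subst hprev; subst hcc; subst hrun; simp [prevEq]
      · subst hprev; subst hrun; rfl
    have hA : stepA (dd, rs, cs, cc) (n, t) =
        ((if (cs == t && decide (cc ≥ 3))
            || (PySem.List.pyRange (t-9) t 1).any (fun i => rs'.contains i && decide (rs'.getD i 0 ≥ 20))
            || (PySem.List.pyRange (t-59) t 1).any (fun i => rs'.contains i && decide (rs'.getD i 0 ≥ 60))
          then dd + 1 else dd),
         rs'.keys.foldl (fun d k => d.modify k 0 (· + 1)) rs',
         (if cs != t then t else cs),
         (if cs != t then (0:Int) else cc) + 1) := by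
      simp only [stepA, ← hrs', hct', if_true]
      cases hx1 : (cs == t && decide (cc ≥ 3)) <;>
        cases hx2 : (PySem.List.pyRange (t-9) t 1).any
          (fun i => rs'.contains i && decide (rs'.getD i 0 ≥ 20)) <;>
        cases hx3 : (PySem.List.pyRange (t-59) t 1).any
          (fun i => rs'.contains i && decide (rs'.getD i 0 ≥ 60)) <;>
        simp [hx1, hx2, hx3] <;>
        (by_cases hcs : cs = t <;> simp [hcs])
    have hB : stepB fo (dd, prev, run) (n, t) =
        ((if (prevEq prev t && decide (run ≥ 3))
            || (PySem.List.pyRange (t-9) t 1).any (fun i => fo.contains i && decide (fo.getD i 0 ≤ n - 20))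
            || (PySem.List.pyRange (t-59) t 1).any (fun i => fo.contains i && decide (fo.getD i 0 ≤ n - 60))
          then dd + 1 else dd),
         (if prevNe prev t then (some t, (0:Int)) else (prev, run)).1,
         (if prevNe prev t then (some t, (0:Int)) else (prev, run)).2 + 1) := by
      simp only [stepB]
      cases hx1 : (prevEq prev t && decide (run ≥ 3)) <;>
        cases hx2 : (PySem.List.pyRange (t-9) t 1).any
          (fun i => fo.contains i && decide (fo.getD i 0 ≤ n - 20)) <;>
        cases hx3 : (PySem.List.pyRange (t-59) t 1).any
          (fun i => fo.contains i && decide (fo.getD i 0 ≤ n - 60)) <;>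
        simp [hx1, hx2, hx3]
    rw [hA, hB, hb1, hw1, hw2]
    -- invariants for the extended prefix pre ++ [t]
    have hnd2 : (rs'.keys.foldl (fun d k => d.modify k 0 (· + 1)) rs').keys.Nodup := by
      rw [keys_incr_all]; exact hnd'
    have hcont2 : ∀ i, (rs'.keys.foldl (fun d k => d.modify k 0 (· + 1)) rs').contains i =
        decide (i ∈ pre ++ [t]) := by
      intro i
      rw [PySem.Dict.contains_eq_decide_mem_keys, keys_incr_all,
        ← PySem.Dict.contains_eq_decide_mem_keys, hcont' i]
      exact decide_eq_decide.mpr (by simp [List.mem_append]; tauto)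
    have hval2 : ∀ i, i ∈ pre ++ [t] →
        (rs'.keys.foldl (fun d k => d.modify k 0 (· + 1)) rs').getD i 0 =
        (((pre ++ [t]).length : Nat) : Int) - (((PySem.List.index? (pre ++ [t]) i).getD 0 : Nat) : Int) := by
      intro i hi
      rw [PySem.Dict.getD_foldl_modify_add_one]
      have hik : i ∈ rs'.keys := by
        apply (PySem.Dict.contains_iff_mem_keys _ _).mp
        rw [hcont' i]
        rcases List.mem_append.mp hi with hp | hp
        · simp [hp]
        · simp at hp; simp [hp]
      rw [List.count_eq_one_of_mem hnd' hik]
      by_cases hp : i ∈ pre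
      · have hidx : PySem.List.index? (pre ++ [t]) i = PySem.List.index? pre i :=
          PySem.List.index?_append_of_mem [t] hp
        obtain ⟨fp, hfp⟩ := Option.isSome_iff_exists.mp ((PySem.List.index?_isSome_iff pre i).mpr hp)
        have hgd : rs'.getD i 0 = n - (fp : Int) := by
          by_cases hit : i = t
          · have hct : rs.contains t = true := by
              rw [hcont t]
              exact decide_eq_true (hit ▸ hp)
            rw [hrs', if_pos hct, hval i hp, hfp]
            rfl
          · rw [hval' i hp hit, hfp]
            rfl
        rw [hgd, hidx, hfp]
        simp only [List.length_append, List.length_cons, List.length_nil, Option.getD_some]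
        push_cast [hn]
        ring
      · have hit : i = t := by
          rcases List.mem_append.mp hi with hp' | hp'
          · exact absurd hp' hp
          · simpa using hp'
        subst hit
        have hct : rs.contains i = false := by
          rw [hcont i]
          exact decide_eq_false hp
        have hgd : rs'.getD i 0 = 0 := by
          rw [hrs', if_neg (by simp [hct]), PySem.Dict.getD_insert, if_pos rfl]
        rw [hgd, PySem.List.index?_append_singleton_self pre i hp]
        simp only [List.length_append, List.length_cons, List.length_nil, Option.getD_some]
        push_cast [hn]
        ring
    have hpr2 : ((pre ++ [t] = [] ∧
          (if prevNe prev t then (some t, (0:Int)) else (prev, run)).1 = none ∧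
          (if cs != t then (0:Int) else cc) + 1 = 0 ∧
          (if prevNe prev t then (some t, (0:Int)) else (prev, run)).2 + 1 = 0) ∨
        (pre ++ [t] ≠ [] ∧
          (if prevNe prev t then (some t, (0:Int)) else (prev, run)).1 =
            some (if cs != t then t else cs) ∧
          (if prevNe prev t then (some t, (0:Int)) else (prev, run)).2 + 1 =
            (if cs != t then (0:Int) else cc) + 1)) := by
      right
      refine ⟨by simp, ?_, ?_⟩
      · rcases hpr with ⟨_, hprev, _, _⟩ | ⟨_, hprev, _⟩
        · subst hprev
          by_cases hcs : cs = t <;> simp [hcs, prevNe]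
        · subst hprev
          by_cases hcs : cs = t <;> simp [hcs, prevNe]
      · rcases hpr with ⟨_, hprev, hcc, hrun⟩ | ⟨_, hprev, hrun⟩
        · subst hprev; subst hcc; subst hrun
          by_cases hcs : cs = t <;> simp [hcs, prevNe]
        · subst hprev; subst hrun
          by_cases hcs : cs = t <;> simp [hcs, prevNe]
    have hlen : (((pre ++ [t]).length : Nat) : Int) = n + 1 := by
      simp [hn]
    have := ih (pre ++ [t]) (by simpa using h)
      (if (prevEq prev t && decide (run ≥ 3))
          || (PySem.List.pyRange (t-9) t 1).any (fun i => fo.contains i && decide (fo.getD i 0 ≤ n - 20))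
          || (PySem.List.pyRange (t-59) t 1).any (fun i => fo.contains i && decide (fo.getD i 0 ≤ n - 60))
        then dd + 1 else dd)
      (rs'.keys.foldl (fun d k => d.modify k 0 (· + 1)) rs')
      (if cs != t then t else cs)
      ((if cs != t then (0:Int) else cc) + 1)
      (if prevNe prev t then (some t, (0:Int)) else (prev, run)).1
      ((if prevNe prev t then (some t, (0:Int)) else (prev, run)).2 + 1)
      hnd2 hcont2 hval2 hpr2
    rw [hlen] at this
    exact this

-- ===== VERDICT (by name: the statement is the Claim_ definition above) =====
theorem droppedRequests_spec : Claim_equal_droppedRequests := by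
  intro xs _hdom hpre
  unfold Spec_droppedRequests droppedRequests droppedRequests_alt
  have := main_invariant xs xs [] rfl 0 PySem.Dict.empty (PySem.List.pyGetD xs 0 0) 0 none 0
    (by simp [PySem.Dict.keys_empty]) (by simp [PySem.Dict.contains_empty]) (by simp)
    (Or.inl ⟨rfl, rfl, rfl, rfl⟩)
  have h0 : ((([] : List Int).length : Nat) : Int) = 0 := rfl
  rw [h0] at this
  simpa using this
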